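-- pv_equiv track=rewrite | github.com/maximandreychuk/urban_lessons | mod_8_lesson_2/main.py | set_password
-- ===== SOURCE A (Python) =====
-- class OnlyStringLine(Exception):
--     pass
--
-- class OnlyNumbersLine(Exception):
--     pass
--
-- def set_password(qwerty):
--     int_to_str_lst = [str(i) for i in range(0, 10)]
--     res = []
--     for i in qwerty:
--         if i in int_to_str_lst:
--             res.append(1)
--     try:
--         if len(res)-len(qwerty) == 0:
--             raise OnlyNumbersLine
--         elif len(res) == 0:
--             raise OnlyStringLine
--     except OnlyNumbersLine:
--         return f"Должна быть хотя бы одна буква"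
--     except OnlyStringLine:
--         return f"Должно быть хотя бы одно число"
--     else:
--         return "Пароль валиден"
-- ===== SOURCE B (Python) =====
-- # B: decide by set subset/disjointness over unique characters instead of counting digit occurrences.
-- def set_password(qwerty):
--     chars = set(qwerty)
--     digits = set('0123456789')
--     if chars <= digits:
--         return "Должна быть хотя бы одна буква"
--     if chars.isdisjoint(digits):
--         return "Должно быть хотя бы одно число"
--     return "Пароль валиден"
-- ===== Notes on version B (the rewrite author's own statement) =====
-- stated objective: idiomatic
-- what changed: B builds the set of distinct characters once and decides by subset-of-digits / disjoint-from-digits set tests instead of A's loop that appends 1 per digit occurrence and compares the count with the string length.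
import Mathlib
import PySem

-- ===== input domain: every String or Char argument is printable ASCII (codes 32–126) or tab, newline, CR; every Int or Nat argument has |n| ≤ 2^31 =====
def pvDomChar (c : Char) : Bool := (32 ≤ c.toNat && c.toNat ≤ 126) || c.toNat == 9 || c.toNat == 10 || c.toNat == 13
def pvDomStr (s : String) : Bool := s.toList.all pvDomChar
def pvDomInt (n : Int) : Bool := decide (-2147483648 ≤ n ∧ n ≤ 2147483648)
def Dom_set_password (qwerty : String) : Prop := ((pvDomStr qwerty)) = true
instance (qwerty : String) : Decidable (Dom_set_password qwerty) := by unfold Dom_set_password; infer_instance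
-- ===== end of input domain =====

-- B decides by subset/disjointness of the set of distinct characters against the digit set,
-- instead of A's loop counting digit occurrences compared with the string length (objective: idiomatic).

-- ===== PORT A =====
def set_password (qwerty : String) : String :=
  let int_to_str_lst : List String := (PySem.List.pyRange 0 10 1).map PySem.Int.toStr
  let res : List Int := qwerty.toList.foldl
    (fun r i => if int_to_str_lst.contains (String.mk [i]) then r ++ [1] else r) []
  if (res.length : Int) - PySem.Str.len qwerty = 0 then
    "Должна быть хотя бы одна буква"
  else if (res.length : Int) = 0 then
    "Должно быть хотя бы одно число"
  else "Пароль валиден"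

-- ===== PORT B =====
def set_password_alt (qwerty : String) : String :=
  let chars : PySem.Set Char := PySem.Set.ofList qwerty.toList
  let digits : PySem.Set Char := PySem.Set.ofList "0123456789".toList
  if PySem.Set.issubset chars digits then
    "Должна быть хотя бы одна буква"
  else if PySem.Set.isdisjoint chars digits then
    "Должно быть хотя бы одно число"
  else "Пароль валиден"


-- ===== PRECONDITION & SPEC =====
def Spec_set_password (qwerty : String) (out : String) : Prop := out = set_password_alt qwerty
instance (qwerty : String) (out : String) : Decidable (Spec_set_password qwerty out) := by unfold Spec_set_password; infer_instance

-- ===== CLAIM (what is proved, stated in full; the proofs are below) =====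
def Claim_equal_set_password : Prop := ∀ (qwerty : String), Dom_set_password qwerty → Spec_set_password qwerty (set_password qwerty)

-- ===== LEMMAS AND PROOFS =====
theorem toList_mk (l : List Char) : (String.mk l).toList = l :=
  Eq.symm (String.ofList_eq.mp rfl)


theorem lem1 (c : Char) (d : Char) (s : String) (h : s.toList = [d]) :
    (String.mk [c] == s) = (c == d) := by
  simp [String.ext_iff, toList_mk, h]

theorem pv_contains_digit (c : Char) :
    ((PySem.List.pyRange 0 10 1).map PySem.Int.toStr).contains (String.mk [c])
      = ("0123456789".toList.contains c) := by
  have h : (PySem.List.pyRange 0 10 1).map PySem.Int.toStr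
      = ["0","1","2","3","4","5","6","7","8","9"] := by decide
  have hd : "0123456789".toList = ['0','1','2','3','4','5','6','7','8','9'] := by decide
  rw [h, hd]
  simp only [List.contains_cons, List.contains_nil,
    lem1 c '0' "0" (by decide), lem1 c '1' "1" (by decide), lem1 c '2' "2" (by decide),
    lem1 c '3' "3" (by decide), lem1 c '4' "4" (by decide), lem1 c '5' "5" (by decide),
    lem1 c '6' "6" (by decide), lem1 c '7' "7" (by decide), lem1 c '8' "8" (by decide),
    lem1 c '9' "9" (by decide)]

theorem pv_main (qwerty : String) : set_password qwerty = set_password_alt qwerty := by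
  unfold set_password set_password_alt
  have hf : (fun (r : List Int) (i : Char) =>
      if ((PySem.List.pyRange 0 10 1).map PySem.Int.toStr).contains (String.mk [i])
      then r ++ [(1:Int)] else r)
      = (fun r i => if "0123456789".toList.contains i then r ++ [1] else r) := by
    funext r i; rw [pv_contains_digit]
  simp only [hf, PySem.List.foldl_append_if, List.nil_append, List.length_map,
    PySem.Str.len_eq]
  simp only [← List.countP_eq_length_filter]
  set l := qwerty.toList with hl
  set q : Char → Bool := fun c => "0123456789".toList.contains c with hq
  by_cases h1 : ∀ x ∈ l, q x
  · have hc : l.countP q = l.length := List.countP_eq_length.mpr h1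
    have hs : PySem.Set.issubset (PySem.Set.ofList l) (PySem.Set.ofList "0123456789".toList) = true := by
      rw [PySem.Set.issubset_iff]
      intro x hx
      rw [PySem.Set.mem_ofList]
      have := h1 x ((PySem.Set.mem_ofList _ _).mp hx)
      simpa [hq, List.contains_iff_mem] using this
    rw [if_pos hs, if_pos (show ((l.countP q : Int)) - (l.length : Int) = 0 by rw [hc]; exact sub_self _)]
  · have hc : l.countP q ≠ l.length := fun h => h1 (List.countP_eq_length.mp h)
    have hs : PySem.Set.issubset (PySem.Set.ofList l) (PySem.Set.ofList "0123456789".toList) = false := by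
      rw [Bool.eq_false_iff]
      intro hsub
      apply h1
      intro x hx
      have := (PySem.Set.issubset_iff _ _).mp hsub x ((PySem.Set.mem_ofList _ _).mpr hx)
      rw [PySem.Set.mem_ofList] at this
      simpa [hq, List.contains_iff_mem] using this
    have hcount : l.countP q ≤ l.length := List.countP_le_length
    rw [hs, if_neg (show ¬((l.countP q : Int) - (l.length : Int) = 0) by intro h; apply hc; omega),
      if_neg (show ¬(false = true) by simp)]
    by_cases h2 : ∀ x ∈ l, ¬ (q x = true)
    · have hc0 : l.countP q = 0 := List.countP_eq_zero.mpr h2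
      have hd : PySem.Set.isdisjoint (PySem.Set.ofList l) (PySem.Set.ofList "0123456789".toList) = true := by
        rw [PySem.Set.isdisjoint_iff]
        intro x hx hx2
        exact h2 x ((PySem.Set.mem_ofList _ _).mp hx)
          (by simpa [hq, List.contains_iff_mem] using (PySem.Set.mem_ofList _ _).mp hx2)
      rw [if_pos hd, if_pos (show (l.countP q : Int) = 0 by exact_mod_cast hc0)]
    · have hc0 : l.countP q ≠ 0 := fun h => h2 (List.countP_eq_zero.mp h)
      have hd : PySem.Set.isdisjoint (PySem.Set.ofList l) (PySem.Set.ofList "0123456789".toList) = false := by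
        rw [Bool.eq_false_iff]
        intro hdis
        apply h2
        intro x hx hcx
        exact (PySem.Set.isdisjoint_iff _ _).mp hdis x ((PySem.Set.mem_ofList _ _).mpr hx)
          ((PySem.Set.mem_ofList _ _).mpr (by simpa [hq, List.contains_iff_mem] using hcx))
      rw [hd, if_neg (show ¬((l.countP q : Int) = 0) from fun h => hc0 (by exact_mod_cast h)),
        if_neg (show ¬(false = true) by simp)]

-- ===== VERDICT (by name: the statement is the Claim_ definition above) =====
theorem set_password_spec : Claim_equal_set_password := by
  intro q _
  unfold Spec_set_password
  exact pv_main q
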